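-- pv_equiv track=rewrite | github.com/BFl47/1.1.Fondamenti-di-Informatica-I | 3.Esami/EsameDel20190614/ProvaAlCalcolatore/Compito_A/Eserc2/A_Ex2.py | A_Ex2
-- ===== SOURCE A (Python) =====
-- def A_Ex2(m,l1,l2):
--     righe = len(m)
--     colonne = len(m[0])
--     l = []
--     for i in range(righe):
--         riga = []
--         for j in range(colonne):
--             if (i+1) not in l1 and (j+1) not in l2:
--                 riga.append(m[i][j])
--         if riga != []:
--             l.append(riga)
--     return l
-- ===== SOURCE B (Python) =====
-- def A_Ex2(m, l1, l2):
--     colonne = len(m[0])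
--     kept = [row[:colonne] for i, row in enumerate(m) if (i + 1) not in l1]
--     cols = [c for j, c in enumerate(zip(*kept)) if (j + 1) not in l2]
--     return [list(r) for r in zip(*cols)]
-- ===== Notes on version B (the rewrite author's own statement) =====
-- stated objective: alternative
-- what changed: B computes the result by staged whole-matrix passes: keep the surviving rows (trimmed to the width of the first row), transpose with zip(*), filter the surviving columns by position, and transpose back, instead of A's per-cell double loop with membership tests and a non-empty-row guard.
import Mathlib
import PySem

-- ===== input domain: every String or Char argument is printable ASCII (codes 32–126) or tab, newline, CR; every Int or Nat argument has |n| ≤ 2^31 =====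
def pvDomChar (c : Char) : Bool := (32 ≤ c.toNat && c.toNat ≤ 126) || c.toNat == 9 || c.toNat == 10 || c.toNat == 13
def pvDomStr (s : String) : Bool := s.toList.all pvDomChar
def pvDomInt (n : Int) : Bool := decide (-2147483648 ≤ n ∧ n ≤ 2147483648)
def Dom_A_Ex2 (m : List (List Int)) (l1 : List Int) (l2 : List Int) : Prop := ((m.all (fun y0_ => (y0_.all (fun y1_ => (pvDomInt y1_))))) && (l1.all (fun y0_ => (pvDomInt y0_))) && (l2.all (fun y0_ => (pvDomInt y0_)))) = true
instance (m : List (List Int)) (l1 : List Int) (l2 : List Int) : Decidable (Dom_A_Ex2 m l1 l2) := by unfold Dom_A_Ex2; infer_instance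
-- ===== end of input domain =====

-- B rebuilds the submatrix by staged passes — keep rows, transpose (zip(*)), keep columns, transpose back — instead of A's per-cell double loop; equivalence of return values on Pre_ (no speed claim).


-- ===== PORT A =====
def A_Ex2 (m : List (List Int)) (l1 : List Int) (l2 : List Int) : List (List Int) :=
  let righe : Int := m.length
  let colonne : Int := (PySem.List.pyGetD m 0 []).length
  (PySem.List.pyRange 0 righe).foldl (fun l i =>
    let riga := (PySem.List.pyRange 0 colonne).foldl (fun riga j =>
      if !(l1.contains (i + 1)) && !(l2.contains (j + 1)) then
        riga ++ [PySem.List.pyGetD (PySem.List.pyGetD m i []) j 0]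
      else riga) []
    if riga ≠ [] then l ++ [riga] else l) []

-- ===== PORT B =====
-- hand port of Python zip(*xss) on a list of integer lists (PySem has no variadic zip):
-- exact — result length is the minimum row length (0 for xss = []), entry k collects xss's k-th elements in order.
def pyZipStar (xss : List (List Int)) : List (List Int) :=
  (List.range (((xss.map List.length).min?).getD 0)).map (fun k => xss.map (fun r => r.getD k 0))

def A_Ex2_alt (m : List (List Int)) (l1 : List Int) (l2 : List Int) : List (List Int) :=
  let colonne : Int := (PySem.List.pyGetD m 0 []).length
  let kept := ((PySem.List.enumerate m).filter (fun p => !(l1.contains (p.1 + 1)))).map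
      (fun p => PySem.List.slice p.2 none (some colonne))
  let cols := ((PySem.List.enumerate (pyZipStar kept)).filter (fun p => !(l2.contains (p.1 + 1)))).map
      (fun p => p.2)
  pyZipStar cols

-- ===== PRECONDITION & SPEC =====
-- Pre_ excludes exactly the inputs on which the Python A raises IndexError: an empty matrix,
-- or a row not skipped by l1 that is shorter than some surviving column index.
def Pre_A_Ex2 (m : List (List Int)) (l1 : List Int) (l2 : List Int) : Prop :=
  m ≠ [] ∧ ∀ i < m.length, ((i + 1 : Int) ∈ l1 ∨
    ∀ j < (m.headD []).length, ((j + 1 : Int) ∈ l2 ∨ j < (m.getD i []).length))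
instance (m : List (List Int)) (l1 : List Int) (l2 : List Int) : Decidable (Pre_A_Ex2 m l1 l2) := by unfold Pre_A_Ex2; infer_instance

def pvWitness_A_Ex2 : List (List Int) × List Int × List Int := ([[1, 2], [3, 4]], [1], [2])

def Spec_A_Ex2 (m : List (List Int)) (l1 : List Int) (l2 : List Int) (out : List (List Int)) : Prop := out = A_Ex2_alt m l1 l2
instance (m : List (List Int)) (l1 : List Int) (l2 : List Int) (out : List (List Int)) : Decidable (Spec_A_Ex2 m l1 l2 out) := by unfold Spec_A_Ex2; infer_instance

-- ===== CLAIM (what is proved, stated in full; the proofs are below) =====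
def Claim_equal_A_Ex2 : Prop := ∀ (m : List (List Int)) (l1 : List Int) (l2 : List Int), Dom_A_Ex2 m l1 l2 → Pre_A_Ex2 m l1 l2 → Spec_A_Ex2 m l1 l2 (A_Ex2 m l1 l2)


-- ===== LEMMAS AND PROOFS =====
-- surviving (0-based) column indices, and kept (0-based) row indices
def sCols (c : Nat) (l2 : List Int) : List Nat :=
  (List.range c).filter (fun j => !(l2.contains ((j : Int) + 1)))

def keptIdx (m : List (List Int)) (l1 : List Int) : List Nat :=
  (List.range m.length).filter (fun i => !(l1.contains ((i : Int) + 1)))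

lemma pyGetD_zero_headD (m : List (List Int)) :
    PySem.List.pyGetD m 0 ([] : List Int) = m.headD [] := by
  cases m with
  | nil => rfl
  | cons x xs => simp [PySem.List.pyGetD_zero_cons]

lemma mem_sCols (c : Nat) (l2 : List Int) (j : Nat) :
    j ∈ sCols c l2 ↔ j < c ∧ ((j : Int) + 1) ∉ l2 := by
  simp [sCols, List.mem_filter, List.mem_range]

lemma mem_keptIdx (m : List (List Int)) (l1 : List Int) (i : Nat) :
    i ∈ keptIdx m l1 ↔ i < m.length ∧ ((i : Int) + 1) ∉ l1 := by
  simp [keptIdx, List.mem_filter, List.mem_range]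

lemma min?_getD_const (l : List Nat) (R : Nat) (hne : l ≠ []) (hall : ∀ x ∈ l, x = R) :
    l.min?.getD 0 = R := by
  cases h : l.min? with
  | none => exact absurd (List.min?_eq_none_iff.mp h) hne
  | some v => simpa using hall v (List.min?_mem h)

lemma lt_min?_getD (l : List Nat) (v : Nat) (hne : l ≠ []) (h : ∀ x ∈ l, v < x) :
    v < l.min?.getD 0 := by
  cases hm : l.min? with
  | none => exact absurd (List.min?_eq_none_iff.mp hm) hne
  | some w => simpa using h w (List.min?_mem hm)

lemma min?_getD_le (l : List Nat) (c : Nat) (hne : l ≠ []) (hall : ∀ x ∈ l, x ≤ c) :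
    l.min?.getD 0 ≤ c := by
  cases hm : l.min? with
  | none => exact absurd (List.min?_eq_none_iff.mp hm) hne
  | some w => simpa using hall w (List.min?_mem hm)

lemma getD_map_lt {a b : Type} (l : List a) (f : a → b) (k : Nat) (h : k < l.length) (d : b) :
    (l.map f).getD k d = f l[k] := by
  rw [List.getD_eq_getElem _ d (by simpa using h), List.getElem_map]

lemma filter_range_eq_of_lt (p : Nat → Bool) (L c : Nat) (hLc : L ≤ c)
    (hbound : ∀ j < c, p j = true → j < L) :
    (List.range c).filter p = (List.range L).filter p := by
  have hsplit : c = L + (c - L) := by omega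
  rw [hsplit, List.range_add, List.filter_append]
  have h2 : ((List.range (c - L)).map (L + ·)).filter p = [] := by
    rw [List.filter_eq_nil_iff]
    intro a ha
    simp only [List.mem_map, List.mem_range] at ha
    obtain ⟨t, ht, rfl⟩ := ha
    intro hp
    have := hbound (L + t) (by omega) hp
    omega
  simp [h2]

lemma riga_eq (m : List (List Int)) (l1 l2 : List Int) (c : Nat) (i : Nat) :
    (List.range c).foldl (fun (riga : List Int) (j : Nat) =>
      if !(l1.contains ((i : Int) + 1)) && !(l2.contains ((j : Int) + 1)) then
        riga ++ [PySem.List.pyGetD (PySem.List.pyGetD m (i : Int) []) ((j : Int)) 0]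
      else riga) [] =
    if l1.contains ((i : Int) + 1) then [] else
      (sCols c l2).map (fun j => ((m.getD i []).getD j 0 : Int)) := by
  by_cases h : l1.contains ((i : Int) + 1)
  · rw [if_pos h,
      PySem.List.foldl_congr_mem _ _ (fun (acc : List Int) (_ : Nat) => acc) []
        (by intro acc x _
            have h' : ((i : Int) + 1) ∈ l1 := by simpa using h
            simp [h']),
      PySem.List.foldl_ignore]
  · rw [if_neg h,
      PySem.List.foldl_congr_mem _ _
        (fun (riga : List Int) (j : Nat) =>
          if !(l2.contains ((j : Int) + 1)) then riga ++ [((m.getD i []).getD j 0 : Int)] else riga) []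
        (by intro acc j _
            have h' : ((i : Int) + 1) ∉ l1 := by simpa using h
            by_cases hb : ((j : Int) + 1) ∈ l2
            · simp [h', hb]
            · simp [h', hb, PySem.List.pyGetD_natCast]),
      PySem.List.foldl_append_if]
    simp [sCols]

lemma A_eq (m : List (List Int)) (l1 l2 : List Int) :
    A_Ex2 m l1 l2 =
      if sCols (m.headD []).length l2 = [] then [] else
        (keptIdx m l1).map (fun i =>
          (sCols (m.headD []).length l2).map (fun j => ((m.getD i []).getD j 0 : Int))) := by
  simp only [A_Ex2, pyGetD_zero_headD, PySem.List.pyRange_zero_natCast, List.foldl_map]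
  rw [PySem.List.foldl_congr_mem _ _
      (fun (l : List (List Int)) (i : Nat) =>
        if (if l1.contains ((i : Int) + 1) then [] else
            (sCols (m.headD []).length l2).map (fun j => ((m.getD i []).getD j 0 : Int))) ≠ [] then
          l ++ [if l1.contains ((i : Int) + 1) then [] else
            (sCols (m.headD []).length l2).map (fun j => ((m.getD i []).getD j 0 : Int))]
        else l) []
      (by intro acc i _; simp only [riga_eq])]
  set S := sCols (m.headD []).length l2 with hSdef
  by_cases hS : S = []
  · simp [hS]
  · rw [if_neg hS,
      PySem.List.foldl_congr_mem _ _
        (fun (l : List (List Int)) (i : Nat) =>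
          if !(l1.contains ((i : Int) + 1)) then
            l ++ [S.map (fun j => ((m.getD i []).getD j 0 : Int))]
          else l) []
        (by intro acc i _
            by_cases h1 : ((i : Int) + 1) ∈ l1
            · simp [h1]
            · simp [h1, hS]),
      PySem.List.foldl_append_if]
    simp [keptIdx]

lemma kept_eq (m : List (List Int)) (l1 : List Int) :
    ((PySem.List.enumerate m).filter (fun p => !(l1.contains (p.1 + 1)))).map
      (fun p => PySem.List.slice p.2 none (some ((PySem.List.pyGetD m 0 ([] : List Int)).length : Int))) =
    (keptIdx m l1).map (fun i => (m.getD i []).take (m.headD []).length) := by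
  rw [PySem.List.enumerate_eq_map_pyRange m ([] : List Int), PySem.List.len_eq,
    PySem.List.pyRange_zero_natCast, List.map_map, List.filter_map, List.map_map]
  simp only [keptIdx]
  apply List.map_congr_left
  intro k _
  simp [PySem.List.pyGetD_natCast, PySem.List.slice_to_natCast, pyGetD_zero_headD]

-- ===== VERDICT (by name: the statement is the Claim_ definition above) =====
theorem A_Ex2_spec : Claim_equal_A_Ex2 := by
  intro m l1 l2 _ hpre
  unfold Spec_A_Ex2
  rw [A_eq]
  simp only [A_Ex2_alt]
  rw [kept_eq]
  set c := (m.headD []).length with hcdef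
  set K := (keptIdx m l1).map (fun i => (m.getD i []).take c) with hK
  by_cases hKI : keptIdx m l1 = []
  · simp [hKI, hK, pyZipStar, PySem.List.enumerate_nil]
  · have hKne : K ≠ [] := by simp [hK, hKI]
    have key0 : ∀ j ∈ sCols c l2, ∀ i ∈ keptIdx m l1, j < (m.getD i []).length := by
      intro j hj i hi
      rw [mem_sCols] at hj
      rw [mem_keptIdx] at hi
      rcases hpre.2 i hi.1 with h1 | h2
      · exact absurd h1 hi.2
      · rcases h2 j hj.1 with h3 | h4
        · exact absurd h3 hj.2
        · exact h4
    have key : ∀ j ∈ sCols c l2, ∀ r ∈ K, j < r.length := by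
      intro j hj r hr
      rw [hK, List.mem_map] at hr
      obtain ⟨i, hi, rfl⟩ := hr
      have h1 := key0 j hj i hi
      have h2 := (mem_sCols c l2 j).mp hj
      rw [List.length_take]
      omega
    have hSsub : ∀ j ∈ sCols c l2, j < (K.map List.length).min?.getD 0 := by
      intro j hj
      apply lt_min?_getD _ _ (by simpa using hKne)
      intro x hx
      rw [List.mem_map] at hx
      obtain ⟨r, hr, rfl⟩ := hx
      exact key j hj r hr
    have hLc : (K.map List.length).min?.getD 0 ≤ c := by
      apply min?_getD_le _ _ (by simpa using hKne)
      intro x hx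
      rw [List.mem_map] at hx
      obtain ⟨r, hr, rfl⟩ := hx
      rw [hK, List.mem_map] at hr
      obtain ⟨i, _, rfl⟩ := hr
      simp [List.length_take]
    have hS' : sCols c l2 = sCols ((K.map List.length).min?.getD 0) l2 := by
      unfold sCols
      apply filter_range_eq_of_lt _ _ _ hLc
      intro j hjc hpj
      apply hSsub j
      rw [mem_sCols]
      constructor
      · exact hjc
      · simpa using hpj
    have hcols : ((PySem.List.enumerate (pyZipStar K)).filter
          (fun p => !(l2.contains (p.1 + 1)))).map (fun p => p.2)
        = (sCols ((K.map List.length).min?.getD 0) l2).map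
            (fun j => K.map (fun r => r.getD j 0)) := by
      rw [PySem.List.enumerate_eq_map_pyRange (pyZipStar K) ([] : List Int), PySem.List.len_eq]
      have hlen : (pyZipStar K).length = (K.map List.length).min?.getD 0 := by
        simp [pyZipStar]
      rw [hlen, PySem.List.pyRange_zero_natCast, List.map_map, List.filter_map, List.map_map]
      simp only [sCols]
      apply List.map_congr_left
      intro j hj
      have hjL : j < (K.map List.length).min?.getD 0 := by
        have := List.mem_filter.mp hj
        simpa using List.mem_range.mp this.1
      have hgd : PySem.List.pyGetD (pyZipStar K) ((j : Nat) : Int) [] = K.map (fun r => r.getD j 0) := by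
        rw [PySem.List.pyGetD_natCast, List.getD_eq_getElem _ _ (by rw [hlen]; exact hjL)]
        simp [pyZipStar]
      simpa using hgd
    by_cases hS : sCols c l2 = []
    · rw [if_pos hS, hcols, ← hS', hS]
      simp [pyZipStar]
    · rw [if_neg hS, hcols, ← hS']
      have hmin : ((((sCols c l2).map (fun j => K.map (fun r => r.getD j 0))).map List.length).min?).getD 0
          = K.length := by
        apply min?_getD_const _ _ (by simpa using hS)
        intro x hx
        rw [List.mem_map] at hx
        obtain ⟨col, hcol, rfl⟩ := hx
        rw [List.mem_map] at hcol
        obtain ⟨j, _, rfl⟩ := hcol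
        simp
      simp only [pyZipStar, hmin]
      have step : ∀ k, k < K.length →
          ((sCols c l2).map (fun j => K.map (fun r => r.getD j 0))).map (fun col => col.getD k 0)
          = (sCols c l2).map (fun j => ((K.getD k []).getD j 0 : Int)) := by
        intro k hk
        rw [List.map_map]
        apply List.map_congr_left
        intro j _
        simp only [Function.comp_apply]
        rw [getD_map_lt _ _ _ hk, List.getD_eq_getElem _ _ hk]
      rw [List.map_congr_left (fun k hk => step k (List.mem_range.mp hk))]
      apply List.ext_getElem
      · simp [hK]
      · intro k h1 h2
        simp only [List.getElem_map, List.getElem_range]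
        have hkK : k < K.length := by simpa using h2
        have hkI : k < (keptIdx m l1).length := by simpa using h1
        have hKk : K.getD k [] = ((m.getD ((keptIdx m l1)[k]) []).take c) := by
          rw [hK, getD_map_lt _ _ _ hkI]
        rw [hKk]
        apply List.map_congr_left
        intro j hj
        have hjc := ((mem_sCols c l2 j).mp hj).1
        have hjl := key0 j hj ((keptIdx m l1)[k]) (List.getElem_mem hkI)
        rw [List.getD_eq_getElem _ (0 : Int) hjl,
          List.getD_eq_getElem _ (0 : Int) (by rw [List.length_take]; omega)]
        simp [List.getElem_take]
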